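-- pv_equiv track=rewrite | github.com/JackDraak/Python_Fifteen_Game | trainAI_controller.py | cantor_pair
-- ===== SOURCE A (Python) =====
-- def cantor_pair(a, b):
--     ab = a + b
--     ab1 = a + b + 1
--     factors = []
--     i = 2
--     while ab > 1 or ab1 > 1:
--         if ab % i == 0 or ab1 % i == 0:
--             factors.append(i)
--             if ab % i == 0:
--                 ab //= i
--             if ab1 % i == 0:
--                 ab1 //= i
--         else:
--             i += 1
--     result = 1
--     for factor in set(factors):
--         count1 = factors.count(factor)
--         count2 = 0
--         for j in range(count1):
--             if b % factor == 0:
--                 b //= factor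
--                 count2 += 1
--         result *= factor ** (count1 - count2)
--     return result
-- ===== SOURCE B (Python) =====
-- from math import gcd
--
-- def cantor_pair(a, b):
--     s = a + b
--     p = s * (s + 1) if s > 0 else 1
--     return p // gcd(p, b)
-- ===== Notes on version B (the rewrite author's own statement) =====
-- stated objective: faster
-- what changed: Replaced trial-division factorisation of (a+b) and (a+b+1) plus per-prime division counting by the closed form P // gcd(P, b) with P = (a+b)(a+b+1) for a+b > 0 and P = 1 otherwise.
import Mathlib
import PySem

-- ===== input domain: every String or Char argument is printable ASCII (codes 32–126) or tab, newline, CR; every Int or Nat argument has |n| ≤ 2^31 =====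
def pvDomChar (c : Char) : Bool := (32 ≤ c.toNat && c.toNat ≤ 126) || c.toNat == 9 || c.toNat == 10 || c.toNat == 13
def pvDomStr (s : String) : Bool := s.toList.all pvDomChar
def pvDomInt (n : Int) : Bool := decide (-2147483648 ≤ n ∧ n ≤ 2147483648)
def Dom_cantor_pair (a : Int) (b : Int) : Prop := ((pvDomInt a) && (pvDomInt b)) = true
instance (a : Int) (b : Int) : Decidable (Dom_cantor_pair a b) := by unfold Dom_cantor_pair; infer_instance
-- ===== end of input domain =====

-- B replaces A's trial-division factorisation loops by the closed form P // gcd(P, b),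
-- P = (a+b)(a+b+1) if a+b > 0 else 1 (objective: faster).

-- ===== PORT A =====
-- termination helper for the while loop (cited by decreasing_by): a division step shrinks ab*ab1
theorem pvProdLt (ab ab1 i : Int) (h1 : 1 ≤ ab) (h2 : 1 ≤ ab1) (h3 : 2 ≤ i)
    (hd : PySem.Int.mod ab i = 0 ∨ PySem.Int.mod ab1 i = 0) :
    ((if PySem.Int.mod ab i = 0 then PySem.Int.floordiv ab i else ab) *
     (if PySem.Int.mod ab1 i = 0 then PySem.Int.floordiv ab1 i else ab1)).toNat < (ab * ab1).toNat := by
  have hipos : (0:Int) < i := by omega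
  have key : ∀ x : Int, 1 ≤ x →
      (1 ≤ (if PySem.Int.mod x i = 0 then PySem.Int.floordiv x i else x) ∧
       (if PySem.Int.mod x i = 0 then PySem.Int.floordiv x i else x) ≤ x) ∧
      (PySem.Int.mod x i = 0 →
       (if PySem.Int.mod x i = 0 then PySem.Int.floordiv x i else x) < x) := by
    intro x hx
    by_cases hmx : PySem.Int.mod x i = 0
    · rw [if_pos hmx]
      have hdvd : i ∣ x := (PySem.Int.mod_eq_zero_iff_dvd x i).mp hmx
      rw [PySem.Int.floordiv_eq_ediv_of_pos hipos]
      have hcan := Int.ediv_mul_cancel hdvd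
      have hpos : 1 ≤ x / i := by
        by_contra hc
        push Not at hc
        have : x / i ≤ 0 := by omega
        nlinarith [hcan]
      have hlt : x / i < x := by nlinarith [hcan]
      exact ⟨⟨hpos, by omega⟩, fun _ => hlt⟩
    · rw [if_neg hmx]
      exact ⟨⟨hx, le_refl x⟩, fun h => absurd h hmx⟩
  obtain ⟨⟨ha1, ha2⟩, ha3⟩ := key ab h1
  obtain ⟨⟨hb1, hb2⟩, hb3⟩ := key ab1 h2
  have hlt : (if PySem.Int.mod ab i = 0 then PySem.Int.floordiv ab i else ab) *
      (if PySem.Int.mod ab1 i = 0 then PySem.Int.floordiv ab1 i else ab1) < ab * ab1 := by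
    rcases hd with hd | hd
    · have := ha3 hd; nlinarith
    · have := hb3 hd; nlinarith
  have hnn : 0 ≤ (if PySem.Int.mod ab i = 0 then PySem.Int.floordiv ab i else ab) *
      (if PySem.Int.mod ab1 i = 0 then PySem.Int.floordiv ab1 i else ab1) := by positivity
  omega

-- A's while loop. The dite guard only makes the recursion total (like fuel): it holds on
-- every state the Python loop reaches (proved in cantorLoop_spec below).
def cantorLoop (ab : Int) (ab1 : Int) (i : Int) (factors : List Int) : List Int :=
  if ab > 1 ∨ ab1 > 1 then
    if h : 1 ≤ ab ∧ 1 ≤ ab1 ∧ 2 ≤ i ∧ i ≤ ab + ab1 then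
      if hd : PySem.Int.mod ab i = 0 ∨ PySem.Int.mod ab1 i = 0 then
        cantorLoop (if PySem.Int.mod ab i = 0 then PySem.Int.floordiv ab i else ab)
                   (if PySem.Int.mod ab1 i = 0 then PySem.Int.floordiv ab1 i else ab1)
                   i (factors ++ [i])
      else
        cantorLoop ab ab1 (i + 1) factors
    else factors
  else factors
termination_by ((ab * ab1).toNat, (ab + ab1 + 1 - i).toNat)
decreasing_by
  · left; exact pvProdLt ab ab1 i h.1 h.2.1 h.2.2.1 hd
  · right; omega

-- body of A's inner "for j in range(count1)" loop; state = (b, count2)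
def pvInnerStep (factor : Int) (st : Int × Int) (_j : Int) : Int × Int :=
  if PySem.Int.mod st.1 factor = 0 then (PySem.Int.floordiv st.1 factor, st.2 + 1) else st

-- one iteration of A's outer "for factor in set(factors)" loop; state = (b, result)
def pvOuterBody (factors : List Int) (st : Int × Int) (factor : Int) : Int × Int :=
  let count1 : Int := (PySem.List.count factors factor : Int)
  let inner := (PySem.List.pyRange 0 count1 1).foldl (pvInnerStep factor) (st.1, 0)
  -- 'factor ** (count1 - count2)': the exponent is a nonnegative int in Python (count2 ≤ count1), so .toNat is exact
  (inner.1, st.2 * factor ^ (count1 - inner.2).toNat)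

def cantor_pair (a : Int) (b : Int) : Int :=
  let factors := cantorLoop (a + b) (a + b + 1) 2 []
  ((PySem.Set.ofList factors).foldl (pvOuterBody factors) (b, 1)).2

-- ===== PORT B =====
def cantor_pair_alt (a : Int) (b : Int) : Int :=
  let s := a + b
  let p : Int := if s > 0 then s * (s + 1) else 1
  PySem.Int.floordiv p (Int.gcd p b)

-- ===== PRECONDITION & SPEC =====
def Spec_cantor_pair (a : Int) (b : Int) (out : Int) : Prop := out = cantor_pair_alt a b
instance (a : Int) (b : Int) (out : Int) : Decidable (Spec_cantor_pair a b out) := by unfold Spec_cantor_pair; infer_instance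

-- ===== CLAIM (what is proved, stated in full; the proofs are below) =====
def Claim_equal_cantor_pair : Prop := ∀ (a : Int) (b : Int), Dom_cantor_pair a b → Spec_cantor_pair a b (cantor_pair a b)

-- ===== LEMMAS AND PROOFS =====

-- an i that divides x while every divisor ≥ 2 of x is ≥ i is prime
theorem pvPrimeOfMinDvd (i x : Int) (h3 : 2 ≤ i) (hdvd : i ∣ x)
    (hmin : ∀ d, 2 ≤ d → d ∣ x → i ≤ d) : Prime i := by
  rw [Int.prime_iff_natAbs_prime]
  have hin : (i.natAbs : Int) = i := Int.natAbs_of_nonneg (by omega)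
  rw [Nat.prime_def]
  refine ⟨by omega, fun m hm => ?_⟩
  have hmne : m ≠ 0 := by
    rintro rfl
    have := Nat.eq_zero_of_zero_dvd hm
    omega
  rcases Nat.lt_or_ge m 2 with hm2 | hm2
  · left; omega
  · right
    have hmi : (m : Int) ∣ i := by
      have := Int.natCast_dvd_natCast.mpr hm
      rwa [hin] at this
    have hle1 : i ≤ (m : Int) := hmin m (by exact_mod_cast hm2) (dvd_trans hmi hdvd)
    have hle2 : (m : Int) ≤ i := Int.le_of_dvd (by omega) hmi
    omega

-- the while loop produces, appended to the accumulator, a list of primes whose product is ab*ab1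
theorem cantorLoop_spec (ab ab1 i : Int) (acc : List Int) (h1 : 1 ≤ ab) (h2 : 1 ≤ ab1)
    (h3 : 2 ≤ i) (hg : Int.gcd ab ab1 = 1)
    (hA : ∀ d, 2 ≤ d → d ∣ ab → i ≤ d) (hB : ∀ d, 2 ≤ d → d ∣ ab1 → i ≤ d) :
    ∃ L, cantorLoop ab ab1 i acc = acc ++ L ∧ (∀ q ∈ L, 2 ≤ q ∧ Prime q) ∧
      L.prod = ab * ab1 := by
  revert h1 h2 h3 hg hA hB
  induction ab, ab1, i, acc using cantorLoop.induct with
  | case1 ab ab1 i acc hcond hguard hd ih =>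
    intro h1 h2 h3 hg hA hB
    have hipos : (0:Int) < i := by omega
    have hnotboth : ¬ (i ∣ ab ∧ i ∣ ab1) := by
      rintro ⟨d1, d2⟩
      have hdg : i ∣ (Int.gcd ab ab1 : Int) := Int.dvd_coe_gcd d1 d2
      rw [hg] at hdg
      have := Int.le_of_dvd (by omega) hdg
      omega
    rcases hd with hmod | hmod
    · -- i divides ab (and then not ab1)
      have hdab : i ∣ ab := (PySem.Int.mod_eq_zero_iff_dvd ab i).mp hmod
      have hmod1 : ¬ PySem.Int.mod ab1 i = 0 := fun h =>
        hnotboth ⟨hdab, (PySem.Int.mod_eq_zero_iff_dvd ab1 i).mp h⟩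
      have hfd : PySem.Int.floordiv ab i = ab / i := PySem.Int.floordiv_eq_ediv_of_pos hipos
      have E1 : (if _h : PySem.Int.mod ab i = 0 then PySem.Int.floordiv ab i else ab) = ab / i := by
        rw [dif_pos hmod, hfd]
      have E2 : (if _h : PySem.Int.mod ab1 i = 0 then PySem.Int.floordiv ab1 i else ab1) = ab1 :=
        dif_neg hmod1
      rw [E1, E2] at ih
      have hcan : ab / i * i = ab := Int.ediv_mul_cancel hdab
      have hq1 : 1 ≤ ab / i := by
        by_contra hc
        push Not at hc
        have : ab / i ≤ 0 := by omega
        nlinarith [hcan]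
      have hdvd' : ab / i ∣ ab := ⟨i, hcan.symm⟩
      have hg' : Int.gcd (ab / i) ab1 = 1 := by
        have hl : ((Int.gcd (ab / i) ab1 : Int)) ∣ ab :=
          dvd_trans (Int.gcd_dvd_left _ _) hdvd'
        have hr : ((Int.gcd (ab / i) ab1 : Int)) ∣ ab1 := Int.gcd_dvd_right _ _
        have := Int.dvd_coe_gcd hl hr
        rw [hg] at this
        have h1' := Int.le_of_dvd (by omega) this
        have h0 : 0 ≤ (Int.gcd (ab / i) ab1 : Int) := Int.natCast_nonneg _
        have : Int.gcd (ab / i) ab1 ≠ 0 := by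
          rw [Ne, Int.gcd_eq_zero_iff]
          rintro ⟨hz, -⟩
          omega
        omega
      obtain ⟨L, hL1, hL2, hL3⟩ := ih hq1 h2 h3 hg'
        (fun d hd2 hdd => hA d hd2 (dvd_trans hdd hdvd')) hB
      refine ⟨i :: L, ?_, ?_, ?_⟩
      · have F1 : (if PySem.Int.mod ab i = 0 then PySem.Int.floordiv ab i else ab) = ab / i := by
          rw [if_pos hmod, hfd]
        have F2 : (if PySem.Int.mod ab1 i = 0 then PySem.Int.floordiv ab1 i else ab1) = ab1 :=
          if_neg hmod1
        rw [cantorLoop, if_pos hcond, dif_pos hguard, dif_pos (Or.inl hmod), F1, F2, hL1]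
        simp [List.append_assoc]
      · intro q hq
        rcases List.mem_cons.mp hq with rfl | hq
        · exact ⟨h3, pvPrimeOfMinDvd q ab h3 hdab hA⟩
        · exact hL2 q hq
      · rw [List.prod_cons, hL3]
        linear_combination ab1 * hcan
    · -- i divides ab1 (and then not ab)
      have hdab1 : i ∣ ab1 := (PySem.Int.mod_eq_zero_iff_dvd ab1 i).mp hmod
      have hmod0 : ¬ PySem.Int.mod ab i = 0 := fun h =>
        hnotboth ⟨(PySem.Int.mod_eq_zero_iff_dvd ab i).mp h, hdab1⟩
      have hfd : PySem.Int.floordiv ab1 i = ab1 / i := PySem.Int.floordiv_eq_ediv_of_pos hipos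
      have E1 : (if _h : PySem.Int.mod ab i = 0 then PySem.Int.floordiv ab i else ab) = ab :=
        dif_neg hmod0
      have E2 : (if _h : PySem.Int.mod ab1 i = 0 then PySem.Int.floordiv ab1 i else ab1) = ab1 / i := by
        rw [dif_pos hmod, hfd]
      rw [E1, E2] at ih
      have hcan : ab1 / i * i = ab1 := Int.ediv_mul_cancel hdab1
      have hq1 : 1 ≤ ab1 / i := by
        by_contra hc
        push Not at hc
        have : ab1 / i ≤ 0 := by omega
        nlinarith [hcan]
      have hdvd' : ab1 / i ∣ ab1 := ⟨i, hcan.symm⟩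
      have hg' : Int.gcd ab (ab1 / i) = 1 := by
        have hr : ((Int.gcd ab (ab1 / i) : Int)) ∣ ab1 :=
          dvd_trans (Int.gcd_dvd_right _ _) hdvd'
        have hl : ((Int.gcd ab (ab1 / i) : Int)) ∣ ab := Int.gcd_dvd_left _ _
        have := Int.dvd_coe_gcd hl hr
        rw [hg] at this
        have h1' := Int.le_of_dvd (by omega) this
        have h0 : 0 ≤ (Int.gcd ab (ab1 / i) : Int) := Int.natCast_nonneg _
        have : Int.gcd ab (ab1 / i) ≠ 0 := by
          rw [Ne, Int.gcd_eq_zero_iff]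
          rintro ⟨hz, -⟩
          omega
        omega
      obtain ⟨L, hL1, hL2, hL3⟩ := ih h1 hq1 h3 hg'
        hA (fun d hd2 hdd => hB d hd2 (dvd_trans hdd hdvd'))
      refine ⟨i :: L, ?_, ?_, ?_⟩
      · have F1 : (if PySem.Int.mod ab i = 0 then PySem.Int.floordiv ab i else ab) = ab :=
          if_neg hmod0
        have F2 : (if PySem.Int.mod ab1 i = 0 then PySem.Int.floordiv ab1 i else ab1) = ab1 / i := by
          rw [if_pos hmod, hfd]
        rw [cantorLoop, if_pos hcond, dif_pos hguard, dif_pos (Or.inr hmod), F1, F2, hL1]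
        simp [List.append_assoc]
      · intro q hq
        rcases List.mem_cons.mp hq with rfl | hq
        · exact ⟨h3, pvPrimeOfMinDvd q ab1 h3 hdab1 hB⟩
        · exact hL2 q hq
      · rw [List.prod_cons, hL3]
        linear_combination ab * hcan
  | case2 ab ab1 i acc hcond hguard hd ih =>
    intro h1 h2 h3 hg hA hB
    push Not at hd
    obtain ⟨hma, hmb⟩ := hd
    have hnda : ¬ i ∣ ab := fun h => hma ((PySem.Int.mod_eq_zero_iff_dvd ab i).mpr h)
    have hndb : ¬ i ∣ ab1 := fun h => hmb ((PySem.Int.mod_eq_zero_iff_dvd ab1 i).mpr h)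
    obtain ⟨L, hL1, hL2, hL3⟩ := ih h1 h2 (by omega) hg
      (fun d hd2 hdd => by
        have := hA d hd2 hdd
        have hne : d ≠ i := fun he => hnda (he ▸ hdd)
        omega)
      (fun d hd2 hdd => by
        have := hB d hd2 hdd
        have hne : d ≠ i := fun he => hndb (he ▸ hdd)
        omega)
    refine ⟨L, ?_, hL2, hL3⟩
    rw [cantorLoop, if_pos hcond, dif_pos hguard, dif_neg (not_or.mpr ⟨hma, hmb⟩), hL1]
  | case3 ab ab1 i acc hcond hguard =>
    intro h1 h2 h3 hg hA hB
    exfalso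
    apply hguard
    refine ⟨h1, h2, h3, ?_⟩
    rcases hcond with hc | hc
    · have := hA ab (by omega) dvd_rfl
      omega
    · have := hB ab1 (by omega) dvd_rfl
      omega
  | case4 ab ab1 i acc hcond =>
    intro h1 h2 h3 hg hA hB
    push Not at hcond
    have hab : ab = 1 := by omega
    have hab1 : ab1 = 1 := by omega
    refine ⟨[], ?_, by simp, by simp [hab, hab1]⟩
    rw [cantorLoop, if_neg (by omega)]
    simp

-- inner loop: folding the step over a list of length n divides out q exactly m ≤ n times
theorem pvInner_spec (q : Int) (hq : 2 ≤ q) (l : List Int) :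
    ∀ b c0 : Int, ∃ (b' : Int) (m : Nat),
      l.foldl (pvInnerStep q) (b, c0) = (b', c0 + m) ∧ m ≤ l.length ∧ b = b' * q ^ m ∧
      (m = l.length ∨ ¬ q ∣ b') := by
  have hqpos : (0:Int) < q := by omega
  induction l with
  | nil =>
    intro b c0
    exact ⟨b, 0, by simp, by simp, by simp, Or.inl rfl⟩
  | cons x t ih =>
    intro b c0
    by_cases hdv : q ∣ b
    · have hm : PySem.Int.mod b q = 0 := (PySem.Int.mod_eq_zero_iff_dvd b q).mpr hdv
      have hstep : pvInnerStep q (b, c0) x = (PySem.Int.floordiv b q, c0 + 1) := by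
        simp [pvInnerStep, hm]
      obtain ⟨b', m', heq, hle, hfac, hdisj⟩ := ih (PySem.Int.floordiv b q) (c0 + 1)
      refine ⟨b', m' + 1, ?_, by simp; omega, ?_, ?_⟩
      · rw [List.foldl_cons, hstep, heq]
        congr 1
        push_cast
        ring
      · have hcan : b / q * q = b := Int.ediv_mul_cancel hdv
        rw [PySem.Int.floordiv_eq_ediv_of_pos hqpos] at hfac
        calc b = b / q * q := hcan.symm
        _ = b' * q ^ m' * q := by rw [hfac]
        _ = b' * q ^ (m' + 1) := by ring
      · rcases hdisj with h | h
        · exact Or.inl (by simp [h])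
        · exact Or.inr h
    · have hm : ¬ PySem.Int.mod b q = 0 := fun h => hdv ((PySem.Int.mod_eq_zero_iff_dvd b q).mp h)
      have hstep : pvInnerStep q (b, c0) x = (b, c0) := by simp [pvInnerStep, hm]
      obtain ⟨b', m', heq, hle, hfac, hdisj⟩ := ih b c0
      have hm0 : m' = 0 := by
        by_contra hne
        exact hdv (hfac ▸ Dvd.dvd.mul_left (dvd_pow_self q hne) b')
      refine ⟨b', m', ?_, by simp; omega, hfac, Or.inr ?_⟩
      · rw [List.foldl_cons, hstep, heq]
      · subst hm0
        rw [pow_zero, mul_one] at hfac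
        exact hfac ▸ hdv

-- gcd of a prime power times any factor, against p^m * t with p dividing neither t nor (if m < c) t
theorem pvGcdKey (p : Nat) (hp : p.Prime) (c m : Nat) (hm : m ≤ c) (A t : Nat)
    (ht : m = c ∨ ¬ p ∣ t) :
    Nat.gcd (p ^ c * A) (p ^ m * t) = p ^ m * Nat.gcd A t := by
  have hsplit : p ^ c = p ^ m * p ^ (c - m) := by
    rw [← pow_add, Nat.add_sub_cancel' hm]
  rw [hsplit, mul_assoc, Nat.gcd_mul_left]
  congr 1
  rcases ht with h | h
  · subst h
    simp
  · have hcop : Nat.Coprime (p ^ (c - m)) t :=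
      Nat.Coprime.pow_left _ ((Nat.Prime.coprime_iff_not_dvd hp).mpr h)
    exact Nat.Coprime.gcd_mul_left_cancel A hcop

-- the outer fold, times the gcd of the remaining prime-power product with b, is invariant
theorem pvOuter_spec (factors : List Int) :
    ∀ (ds : List Int) (b r : Int), ds.Nodup → (∀ q ∈ ds, 2 ≤ q ∧ Prime q) →
      ((ds.foldl (pvOuterBody factors) (b, r)).2 : Int) *
        (Int.gcd ((ds.map (fun q => q ^ (PySem.List.count factors q))).prod) b : Int) =
        r * (ds.map (fun q => q ^ (PySem.List.count factors q))).prod := by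
  intro ds
  induction ds with
  | nil => intro b r _ _; simp
  | cons q ds ih =>
    intro b r hnd hpr
    obtain ⟨hq2, hqp⟩ := hpr q (List.mem_cons_self ..)
    obtain ⟨b', m, heq, hle, hfac, hdisj⟩ :=
      pvInner_spec q hq2 (PySem.List.pyRange 0 ((PySem.List.count factors q : Nat) : Int) 1) b 0
    have hlen : (PySem.List.pyRange 0 ((PySem.List.count factors q : Nat) : Int) 1).length
        = PySem.List.count factors q := by
      rw [PySem.List.length_pyRange_one]
      omega
    rw [hlen] at hle hdisj
    have harg : (((PySem.List.count factors q : Nat) : Int) - (0 + (m : Int))).toNat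
        = PySem.List.count factors q - m := by omega
    have hbody : pvOuterBody factors (b, r) q
        = (b', r * q ^ (PySem.List.count factors q - m)) := by
      simp only [pvOuterBody, heq, harg]
    rw [List.foldl_cons, hbody]
    have IH := ih b' (r * q ^ (PySem.List.count factors q - m)) (List.Nodup.of_cons hnd)
      (fun q' hq' => hpr q' (List.mem_cons_of_mem _ hq'))
    have hp : q.natAbs.Prime := Int.prime_iff_natAbs_prime.mp hqp
    have hqn : (q.natAbs : Int) = q := Int.natAbs_of_nonneg (by omega)
    have ht : m = PySem.List.count factors q ∨ ¬ q.natAbs ∣ b'.natAbs := by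
      rcases hdisj with h | h
      · exact Or.inl h
      · exact Or.inr (fun hc => h (Int.natAbs_dvd_natAbs.mp hc))
    have hgcd : Int.gcd ((q ^ (PySem.List.count factors q))
          * (ds.map (fun q => q ^ (PySem.List.count factors q))).prod) b
        = q.natAbs ^ m * Int.gcd ((ds.map (fun q => q ^ (PySem.List.count factors q))).prod) b' := by
      unfold Int.gcd
      rw [show ((q ^ (PySem.List.count factors q))
            * (ds.map (fun q => q ^ (PySem.List.count factors q))).prod).natAbs
          = q.natAbs ^ (PySem.List.count factors q)
            * ((ds.map (fun q => q ^ (PySem.List.count factors q))).prod).natAbs from by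
        rw [Int.natAbs_mul, Int.natAbs_pow]]
      rw [show b.natAbs = q.natAbs ^ m * b'.natAbs from by
        rw [hfac, Int.natAbs_mul, Int.natAbs_pow]; ring]
      exact pvGcdKey q.natAbs hp _ m hle _ b'.natAbs ht
    have hpow : q ^ m * q ^ (PySem.List.count factors q - m) = q ^ (PySem.List.count factors q) := by
      rw [← pow_add, Nat.add_sub_cancel' hle]
    calc ((ds.foldl (pvOuterBody factors) (b', r * q ^ (PySem.List.count factors q - m))).2 : Int) *
          (Int.gcd (((q :: ds).map (fun q => q ^ (PySem.List.count factors q))).prod) b : Int)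
        = ((ds.foldl (pvOuterBody factors) (b', r * q ^ (PySem.List.count factors q - m))).2 : Int) *
          (q ^ m * (Int.gcd ((ds.map (fun q => q ^ (PySem.List.count factors q))).prod) b' : Int)) := by
          rw [List.map_cons, List.prod_cons, hgcd]
          push_cast [hqn]
          ring
      _ = q ^ m * (((ds.foldl (pvOuterBody factors) (b', r * q ^ (PySem.List.count factors q - m))).2 : Int) *
          (Int.gcd ((ds.map (fun q => q ^ (PySem.List.count factors q))).prod) b' : Int)) := by ring
      _ = q ^ m * (r * q ^ (PySem.List.count factors q - m) *
          (ds.map (fun q => q ^ (PySem.List.count factors q))).prod) := by rw [IH]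
      _ = r * (((q :: ds).map (fun q => q ^ (PySem.List.count factors q))).prod) := by
          rw [List.map_cons, List.prod_cons, ← hpow]
          ring

-- the product over the distinct factors of q^(multiplicity in L) is the product of L
theorem pvProd_dedup (L : List Int) :
    ((PySem.Set.ofList L).map (fun q => q ^ (PySem.List.count L q))).prod = L.prod := by
  rw [← List.prod_toFinset _ (PySem.Set.nodup_ofList L)]
  have hfs : (PySem.Set.ofList L).toFinset = L.toFinset := by
    ext x
    simp [List.mem_toFinset, PySem.Set.mem_ofList]
  rw [hfs, Finset.prod_list_count L]
  exact Finset.prod_congr rfl (fun x _ => by rw [PySem.List.count_eq])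

-- ===== VERDICT (by name: the statement is the Claim_ definition above) =====
theorem cantor_pair_spec : Claim_equal_cantor_pair := by
  unfold Claim_equal_cantor_pair Spec_cantor_pair
  intro a b _
  show ((PySem.Set.ofList (cantorLoop (a + b) (a + b + 1) 2 [])).foldl
      (pvOuterBody (cantorLoop (a + b) (a + b + 1) 2 [])) (b, 1)).2
    = PySem.Int.floordiv (if a + b > 0 then (a + b) * (a + b + 1) else 1)
        (Int.gcd (if a + b > 0 then (a + b) * (a + b + 1) else 1) b)
  by_cases hs : a + b > 0
  · -- positive sum: the loop factorises (a+b)(a+b+1)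
    obtain ⟨L, hLe, hLp, hLprod⟩ := cantorLoop_spec (a + b) (a + b + 1) 2 []
      (by omega) (by omega) (by omega)
      (Int.isCoprime_iff_gcd_eq_one.mp ⟨-1, 1, by ring⟩)
      (fun d h2 _ => h2) (fun d h2 _ => h2)
    rw [List.nil_append] at hLe
    have E := pvOuter_spec L (PySem.Set.ofList L) b 1 (PySem.Set.nodup_ofList L)
      (fun q hq => hLp q ((PySem.Set.mem_ofList L q).mp hq))
    rw [pvProd_dedup, one_mul] at E
    have hPpos : 0 < L.prod := by
      rw [hLprod]
      nlinarith
    have hg0 : Int.gcd L.prod b ≠ 0 := by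
      rw [Ne, Int.gcd_eq_zero_iff]
      rintro ⟨hz, -⟩
      omega
    have hgpos : (0:Int) < (Int.gcd L.prod b : Int) := by
      exact_mod_cast Nat.pos_of_ne_zero hg0
    rw [hLe, if_pos hs, ← hLprod, PySem.Int.floordiv_eq_ediv_of_pos hgpos]
    set g : Int := (Int.gcd L.prod b : Int) with hgdef
    rw [← E, Int.mul_ediv_cancel _ (by omega)]
  · -- nonpositive sum: the loop never runs, both sides are 1
    have hloop : cantorLoop (a + b) (a + b + 1) 2 [] = [] := by
      rw [cantorLoop, if_neg (by omega)]
    rw [hloop, if_neg hs]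
    show (1:Int) = PySem.Int.floordiv 1 (Int.gcd 1 b)
    rw [Int.one_gcd]
    decide
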